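-- pv_equiv track=rewrite | github.com/adamfitzgibbon/algorithms | advent-of-code/2015/day-5/5.2.py | check_nice
-- ===== SOURCE A (Python) =====
-- def check_nice(line):
--   doublePair = False
--   skipPair = False
--   for i, c in enumerate(line):
--     if i + 2 < len(line):
--       if c + line[i+1] in line[i+2:]:
--         doublePair = True
--       if c == line[i+2]:
--         skipPair = True
--   return doublePair and skipPair
-- ===== SOURCE B (Python) =====
-- def check_nice(line):
--     n = len(line)
--     first = {}
--     double_pair = False
--     for j in range(n - 1):
--         pair = line[j:j+2]
--         if pair in first:
--             if j - first[pair] >= 2: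
--                 double_pair = True
--         else:
--             first[pair] = j
--     skip_pair = any(line[i] == line[i+2] for i in range(n - 2))
--     return double_pair and skip_pair
-- ===== Notes on version B (the rewrite author's own statement) =====
-- stated objective: faster
-- what changed: Replaces A's per-index substring search of each pair in the rest of the string (a quadratic nested scan) with a single pass that records each pair's first occurrence index in a dict and flags a repeat at distance >= 2, plus a direct linear scan for the letter sandwich.
import Mathlib
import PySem

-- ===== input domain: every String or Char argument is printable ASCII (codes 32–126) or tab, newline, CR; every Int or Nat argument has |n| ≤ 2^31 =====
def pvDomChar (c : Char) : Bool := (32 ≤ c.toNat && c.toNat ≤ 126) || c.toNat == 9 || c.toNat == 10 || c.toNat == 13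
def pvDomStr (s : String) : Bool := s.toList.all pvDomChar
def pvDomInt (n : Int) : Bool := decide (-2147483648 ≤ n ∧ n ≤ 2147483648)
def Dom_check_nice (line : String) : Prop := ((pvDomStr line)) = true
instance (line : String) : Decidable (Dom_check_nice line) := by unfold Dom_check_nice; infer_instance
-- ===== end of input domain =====

-- B replaces A's per-index substring search with one pass over the pairs keeping each pair's
-- first-occurrence index in a dict, plus a direct linear scan for the letter sandwich.

-- ===== PORT A =====
-- Literal port of A: fold over enumerate(line) carrying the (doublePair, skipPair) flags;
-- under the guard i + 2 < len(line) the index i + 1 is in range, so `getD` never takes its default.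
def check_nice (line : String) : Bool :=
  let l := line.toList
  let st := (PySem.List.enumerate l).foldl
    (fun (st : Bool × Bool) (ic : Int × Char) =>
      if ic.1 + 2 < (l.length : Int) then
        ((if PySem.Chars.isIn [ic.2, (PySem.List.pyGet? l (ic.1 + 1)).getD ic.2]
              (PySem.List.slice l (some (ic.1 + 2)) none) then true else st.1),
         (if PySem.List.pyGet? l (ic.1 + 2) == some ic.2 then true else st.2))
      else st)
    (false, false)
  st.1 && st.2

-- ===== PORT B =====
-- One step of B's dict loop: look the pair up; on a hit at distance ≥ 2 set the flag,
-- on a miss record the first-occurrence index.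
def altStep (l : List Char) (st : PySem.Dict (List Char) Int × Bool) (j : Nat) :
    PySem.Dict (List Char) Int × Bool :=
  let pair := PySem.List.slice l (some (j : Int)) (some ((j : Int) + 2))
  match st.1.get? pair with
  | some f => (st.1, if (j : Int) - f ≥ 2 then true else st.2)
  | none => (st.1.insert pair (j : Int), st.2)

-- Port of B: Python's range(n-1) / range(n-2) are empty when the bound is ≤ 0, which Nat
-- subtraction's clamping reproduces; inside `any` the indices i and i + 2 are in range.
def check_nice_alt (line : String) : Bool :=
  let l := line.toList
  let n := l.length
  let st := (List.range (n - 1)).foldl (altStep l) (PySem.Dict.empty, false)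
  let skip := (List.range (n - 2)).any (fun i => l[i]? == l[i + 2]?)
  st.2 && skip

-- ===== PRECONDITION & SPEC =====
def Spec_check_nice (line : String) (out : Bool) : Prop := out = check_nice_alt line
instance (line : String) (out : Bool) : Decidable (Spec_check_nice line out) := by unfold Spec_check_nice; infer_instance

-- ===== CLAIM (what is proved, stated in full; the proofs are below) =====
def Claim_equal_check_nice : Prop := ∀ (line : String), Dom_check_nice line → Spec_check_nice line (check_nice line)

-- ===== LEMMAS AND PROOFS =====

-- The two-character pair starting at index j.
def pairAt (l : List Char) (j : Nat) : List Char := (l.drop j).take 2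

-- Common characterisations of the two properties both programs test:
-- a pair repeated without overlap, and a letter repeated with one letter between.
def PD (l : List Char) : Prop :=
  ∃ b, b + 1 < l.length ∧ ∃ a, a + 2 ≤ b ∧ pairAt l a = pairAt l b
def PS (l : List Char) : Prop :=
  ∃ i, i + 2 < l.length ∧ l[i]? = l[i + 2]?

-- A's loop only ever raises each flag: it computes `any` of the two per-index tests.
lemma fold_flags (l : List Char) (xs : List (Int × Char)) (d s : Bool) :
    xs.foldl
      (fun (st : Bool × Bool) (ic : Int × Char) =>
        if ic.1 + 2 < (l.length : Int) then
          ((if PySem.Chars.isIn [ic.2, (PySem.List.pyGet? l (ic.1 + 1)).getD ic.2]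
                (PySem.List.slice l (some (ic.1 + 2)) none) then true else st.1),
           (if PySem.List.pyGet? l (ic.1 + 2) == some ic.2 then true else st.2))
        else st)
      (d, s)
    = (d || xs.any (fun ic => decide (ic.1 + 2 < (l.length : Int)) &&
          PySem.Chars.isIn [ic.2, (PySem.List.pyGet? l (ic.1 + 1)).getD ic.2]
            (PySem.List.slice l (some (ic.1 + 2)) none)),
       s || xs.any (fun ic => decide (ic.1 + 2 < (l.length : Int)) &&
          (PySem.List.pyGet? l (ic.1 + 2) == some ic.2))) := by
  induction xs generalizing d s with
  | nil => simp
  | cons x xs ih =>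
    simp only [List.foldl_cons, List.any_cons]
    by_cases hg : x.1 + 2 < (l.length : Int)
    · rw [if_pos hg, ih]
      cases hp : PySem.Chars.isIn [x.2, (PySem.List.pyGet? l (x.1 + 1)).getD x.2]
            (PySem.List.slice l (some (x.1 + 2)) none) <;>
      cases hq : (PySem.List.pyGet? l (x.1 + 2) == some x.2) <;>
        simp [hg, hp, hq]
    · rw [if_neg hg, ih]
      simp [hg]

lemma pairAt_eq (l : List Char) (j : Nat) (h : j + 1 < l.length) :
    pairAt l j = [l[j], l[j+1]] := by
  unfold pairAt
  apply List.ext_getElem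
  · simp; omega
  · intro i h1 h2
    simp only [List.length_take, List.length_drop] at h1
    have : i < 2 := by omega
    interval_cases i <;> simp [List.getElem_take, List.getElem_drop]

lemma anyPD (l : List Char) :
    (∃ ic ∈ PySem.List.enumerate l, decide (ic.1 + 2 < (l.length : Int)) = true ∧
        PySem.Chars.isIn [ic.2, (PySem.List.pyGet? l (ic.1 + 1)).getD ic.2]
          (PySem.List.slice l (some (ic.1 + 2)) none) = true) ↔ PD l := by
  constructor
  · rintro ⟨ic, hmem, h⟩
    rw [PySem.List.mem_enumerate_iff] at hmem
    obtain ⟨k, hk, rfl⟩ := hmem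
    simp only [zero_add] at h
    rw [decide_eq_true_iff] at h
    obtain ⟨hlt, hin⟩ := h
    have hk2 : k + 2 < l.length := by exact_mod_cast hlt
    have e1 : ((k : Int) + 2) = ((k + 2 : Nat) : Int) := by push_cast; ring
    have e2 : ((k : Int) + 1) = ((k + 1 : Nat) : Int) := by push_cast; ring
    rw [e1, e2, PySem.List.slice_from_natCast, PySem.List.pyGet?_natCast,
        List.getElem?_eq_getElem (by omega), Option.getD_some] at hin
    rw [← PySem.Chars.exists_prefix_drop_iff_isIn] at hin
    obtain ⟨j, hj⟩ := hin
    rw [List.drop_drop, List.prefix_iff_eq_take] at hj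
    simp only [List.length_cons, List.length_nil] at hj
    have hlen : k + 2 + j + 1 < l.length := by
      have := congrArg List.length hj
      simp [List.length_take] at this
      omega
    refine ⟨k + 2 + j, hlen, k, by omega, ?_⟩
    rw [pairAt_eq l k (by omega)]
    exact hj
  · rintro ⟨b, hb, a, hab, hpair⟩
    have ha2 : a + 2 < l.length := by omega
    refine ⟨((a : Int), l[a]'(by omega)), ?_, ?_⟩
    · rw [PySem.List.mem_enumerate_iff]
      exact ⟨a, by omega, by simp⟩
    · rw [decide_eq_true_iff]
      dsimp only
      constructor
      · exact_mod_cast ha2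
      · have e1 : ((a : Int) + 2) = ((a + 2 : Nat) : Int) := by push_cast; ring
        have e2 : ((a : Int) + 1) = ((a + 1 : Nat) : Int) := by push_cast; ring
        rw [e1, e2, PySem.List.slice_from_natCast, PySem.List.pyGet?_natCast,
            List.getElem?_eq_getElem (by omega), Option.getD_some]
        rw [← PySem.Chars.exists_prefix_drop_iff_isIn]
        refine ⟨b - (a + 2), ?_⟩
        rw [List.drop_drop, List.prefix_iff_eq_take]
        simp only [List.length_cons, List.length_nil]
        have hb' : a + 2 + (b - (a + 2)) = b := by omega
        rw [hb', ← pairAt_eq l a (by omega)]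
        exact hpair

lemma anyPS (l : List Char) :
    (∃ ic ∈ PySem.List.enumerate l, decide (ic.1 + 2 < (l.length : Int)) = true ∧
        (PySem.List.pyGet? l (ic.1 + 2) == some ic.2) = true) ↔ PS l := by
  constructor
  · rintro ⟨ic, hmem, h⟩
    rw [PySem.List.mem_enumerate_iff] at hmem
    obtain ⟨k, hk, rfl⟩ := hmem
    simp only [zero_add] at h
    rw [decide_eq_true_iff, beq_iff_eq] at h
    obtain ⟨hlt, heq⟩ := h
    have hk2 : k + 2 < l.length := by exact_mod_cast hlt
    have e1 : ((k : Int) + 2) = ((k + 2 : Nat) : Int) := by push_cast; ring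
    rw [e1, PySem.List.pyGet?_natCast] at heq
    exact ⟨k, hk2, by rw [heq, List.getElem?_eq_getElem hk]⟩
  · rintro ⟨i, hi, heq⟩
    refine ⟨((i : Int), l[i]'(by omega)), ?_, ?_⟩
    · rw [PySem.List.mem_enumerate_iff]
      exact ⟨i, by omega, by simp⟩
    · rw [decide_eq_true_iff, beq_iff_eq]
      dsimp only
      constructor
      · exact_mod_cast hi
      · have e1 : ((i : Int) + 2) = ((i + 2 : Nat) : Int) := by push_cast; ring
        rw [e1, PySem.List.pyGet?_natCast, ← heq, List.getElem?_eq_getElem (by omega)]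

-- The pair B slices at index j is pairAt l j.
lemma slice_pair (l : List Char) (j : Nat) :
    PySem.List.slice l (some (j : Int)) (some ((j : Int) + 2)) = pairAt l j := by
  have h := PySem.List.slice_natCast_add l j 2
  rw [show ((j : Int) + ((2 : Nat) : Int)) = ((j : Int) + 2) by norm_num] at h
  exact h

-- Invariant of B's dict loop: the dict maps each pair to its first occurrence among the
-- processed indices, and the flag says some processed pair re-occurred at distance ≥ 2.
lemma B_inv (l : List Char) (m : Nat) :
    (∀ p, ((List.range m).foldl (altStep l) (PySem.Dict.empty, false)).1.get? p
        = (((List.range m).filter (fun j => pairAt l j == p)).head?).map (fun a : Nat => (a : Int)))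
    ∧ ((((List.range m).foldl (altStep l) (PySem.Dict.empty, false)).2 = true)
        ↔ ∃ b, b < m ∧ ∃ a, a + 2 ≤ b ∧ pairAt l a = pairAt l b) := by
  induction m with
  | zero => simp [PySem.Dict.get?, PySem.Dict.empty]
  | succ m ih =>
    obtain ⟨ihD, ihF⟩ := ih
    rw [List.range_succ, List.foldl_append, List.foldl_cons, List.foldl_nil]
    set st := (List.range m).foldl (altStep l) (PySem.Dict.empty, false) with hst
    cases hget : st.1.get? (pairAt l m) with
    | none =>
      have hstep : altStep l st m = (st.1.insert (pairAt l m) (m : Int), st.2) := by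
        unfold altStep
        simp only [slice_pair, hget]
      have hfil : (List.range m).filter (fun j => pairAt l j == pairAt l m) = [] := by
        have := ihD (pairAt l m)
        rw [hget] at this
        cases hc : (List.range m).filter (fun j => pairAt l j == pairAt l m) with
        | nil => rfl
        | cons x xs => rw [hc] at this; simp at this
      rw [hstep]
      dsimp only
      constructor
      · intro p
        rw [PySem.Dict.get?_insert, List.filter_append]
        by_cases hp : p = pairAt l m
        · subst hp
          rw [hfil]
          simp
        · rw [if_neg hp]
          have : (List.filter (fun j => pairAt l j == p) [m]) = [] := by
            simp only [List.filter]
            rw [beq_eq_false_iff_ne.mpr (fun h => hp h.symm)]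
          rw [this, List.append_nil]
          exact ihD p
      · rw [ihF]
        constructor
        · rintro ⟨b, hb, a, hab, hpa⟩
          exact ⟨b, by omega, a, hab, hpa⟩
        · rintro ⟨b, hb, a, hab, hpa⟩
          rcases Nat.lt_succ_iff_lt_or_eq.mp hb with hb' | heq
          · exact ⟨b, hb', a, hab, hpa⟩
          · exfalso
            rw [heq] at hpa hab
            have ha : a ∈ (List.range m).filter (fun j => pairAt l j == pairAt l m) := by
              rw [List.mem_filter, List.mem_range]
              exact ⟨by omega, by simp [hpa]⟩
            rw [hfil] at ha
            simp at ha
    | some f =>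
      have hstep : altStep l st m = (st.1, if (m : Int) - f ≥ 2 then true else st.2) := by
        unfold altStep
        simp only [slice_pair, hget]
      obtain ⟨a0, rest, hfil⟩ : ∃ a0 rest,
          (List.range m).filter (fun j => pairAt l j == pairAt l m) = a0 :: rest := by
        have := ihD (pairAt l m)
        rw [hget] at this
        cases hc : (List.range m).filter (fun j => pairAt l j == pairAt l m) with
        | nil => rw [hc] at this; simp at this
        | cons x xs => exact ⟨x, xs, rfl⟩
      have hf : f = (a0 : Int) := by
        have := ihD (pairAt l m)
        rw [hget, hfil] at this
        simp at this
        omega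
      have ha0mem : a0 ∈ (List.range m).filter (fun j => pairAt l j == pairAt l m) := by
        rw [hfil]; exact List.mem_cons_self
      have ha0 : a0 < m ∧ pairAt l a0 = pairAt l m := by
        rw [List.mem_filter, List.mem_range, beq_iff_eq] at ha0mem
        exact ha0mem
      have hmin : ∀ x ∈ (List.range m).filter (fun j => pairAt l j == pairAt l m), a0 ≤ x := by
        have hpw : ((List.range m).filter (fun j => pairAt l j == pairAt l m)).Pairwise (· < ·) :=
          (List.pairwise_lt_range).filter _
        rw [hfil] at hpw ⊢
        intro x hx
        rcases List.mem_cons.mp hx with rfl | hx'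
        · exact le_refl x
        · exact le_of_lt ((List.pairwise_cons.mp hpw).1 x hx')
      rw [hstep]
      dsimp only
      constructor
      · intro p
        rw [List.filter_append]
        by_cases hp : p = pairAt l m
        · subst hp
          rw [hfil]
          simp only [List.cons_append, List.head?_cons, Option.map_some]
          rw [hget, hf]
        · have : (List.filter (fun j => pairAt l j == p) [m]) = [] := by
            simp only [List.filter]
            rw [beq_eq_false_iff_ne.mpr (fun h => hp h.symm)]
          rw [this, List.append_nil]
          exact ihD p
      · by_cases hd : (m : Int) - f ≥ 2
        · rw [if_pos hd]
          simp only [true_iff]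
          have : a0 + 2 ≤ m := by rw [hf] at hd; omega
          exact ⟨m, by omega, a0, this, ha0.2⟩
        · rw [if_neg hd, ihF]
          constructor
          · rintro ⟨b, hb, a, hab, hpa⟩
            exact ⟨b, by omega, a, hab, hpa⟩
          · rintro ⟨b, hb, a, hab, hpa⟩
            rcases Nat.lt_succ_iff_lt_or_eq.mp hb with hb' | heq
            · exact ⟨b, hb', a, hab, hpa⟩
            · exfalso
              rw [heq] at hpa hab
              have ha : a ∈ (List.range m).filter (fun j => pairAt l j == pairAt l m) := by
                rw [List.mem_filter, List.mem_range]
                exact ⟨by omega, by simp [hpa]⟩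
              have := hmin a ha
              rw [hf] at hd
              omega

lemma A_char (line : String) : check_nice line = true ↔ PD line.toList ∧ PS line.toList := by
  unfold check_nice
  simp only [fold_flags, Bool.false_or, Bool.and_eq_true, List.any_eq_true]
  rw [anyPD, anyPS]

lemma B_char (line : String) :
    check_nice_alt line = true ↔ PD line.toList ∧ PS line.toList := by
  unfold check_nice_alt
  simp only [Bool.and_eq_true]
  rw [(B_inv line.toList (line.toList.length - 1)).2]
  constructor
  · rintro ⟨⟨b, hb, a, hab, hpa⟩, hsk⟩
    refine ⟨⟨b, by omega, a, hab, hpa⟩, ?_⟩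
    rw [List.any_eq_true] at hsk
    obtain ⟨i, hi, h⟩ := hsk
    rw [List.mem_range] at hi
    exact ⟨i, by omega, beq_iff_eq.mp h⟩
  · rintro ⟨⟨b, hb, a, hab, hpa⟩, i, hi, h⟩
    refine ⟨⟨b, by omega, a, hab, hpa⟩, ?_⟩
    rw [List.any_eq_true]
    exact ⟨i, List.mem_range.mpr (by omega), beq_iff_eq.mpr h⟩

-- ===== VERDICT (by name: the statement is the Claim_ definition above) =====
theorem check_nice_spec : Claim_equal_check_nice := by
  intro line _
  unfold Spec_check_nice
  rw [Bool.eq_iff_iff, A_char, B_char]
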